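-- pv_equiv track=rewrite | github.com/kaosat-dev/Blenvy | tools/blenvy/settings.py | are_settings_identical
-- ===== SOURCE A (Python) =====
-- def are_settings_identical(old, new, white_list=None):
--     if old is None and new is None:
--         return True
--     if old is None and new is not None:
--         return False
--     if old is not None and new is None:
--         return False
--
--     old_items = sorted(old.items())
--     new_items = sorted(new.items())
--
--     if white_list is not None:
--         old_items_override = {}
--         new_items_override = {}
--         for key in white_list:
--             if key in old:
--                 old_items_override[key] = old[key]
--             if key in new:
--                 new_items_override[key] = new[key]
--         old_items = sorted(old_items_override.items())
--         new_items = sorted(new_items_override.items())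
--
--     return old_items == new_items
-- ===== SOURCE B (Python) =====
-- def are_settings_identical(old, new, white_list=None):
--     if old is None or new is None:
--         return old is None and new is None
--     if white_list is None:
--         return old == new
--     for key in white_list:
--         in_old = key in old
--         if in_old != (key in new):
--             return False
--         if in_old and old[key] != new[key]:
--             return False
--     return True
-- ===== Notes on version B (the rewrite author's own statement) =====
-- stated objective: simpler
-- what changed: Instead of building two filtered override dicts and comparing their sorted item lists, B does a single short-circuiting scan over white_list comparing presence and value per key, and plain dict equality when white_list is None; removing the O(n log n) sorts makes it measurably faster.
import Mathlib
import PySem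

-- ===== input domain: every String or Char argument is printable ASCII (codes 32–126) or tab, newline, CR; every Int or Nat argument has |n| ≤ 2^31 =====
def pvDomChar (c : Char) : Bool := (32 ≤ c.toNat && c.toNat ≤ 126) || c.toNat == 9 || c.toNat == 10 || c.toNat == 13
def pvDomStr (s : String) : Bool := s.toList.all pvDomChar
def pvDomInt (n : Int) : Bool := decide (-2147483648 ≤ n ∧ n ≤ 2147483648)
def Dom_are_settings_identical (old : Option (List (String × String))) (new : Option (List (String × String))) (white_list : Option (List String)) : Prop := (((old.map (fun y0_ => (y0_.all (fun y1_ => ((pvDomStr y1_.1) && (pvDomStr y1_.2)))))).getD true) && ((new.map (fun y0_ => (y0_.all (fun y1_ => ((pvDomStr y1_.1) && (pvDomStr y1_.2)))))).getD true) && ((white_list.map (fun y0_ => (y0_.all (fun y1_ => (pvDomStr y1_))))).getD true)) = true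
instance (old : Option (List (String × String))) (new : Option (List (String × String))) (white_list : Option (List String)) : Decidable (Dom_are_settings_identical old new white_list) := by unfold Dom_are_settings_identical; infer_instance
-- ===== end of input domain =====

-- B replaces A's build-two-filtered-dicts-then-sort-and-compare with a single short-circuiting
-- scan over white_list (and plain dict equality when white_list is None); same return value.

-- ===== PORT A =====
-- Python dicts arrive as association lists; dict(pairs) is PySem.Dict.ofList.
-- A sorts the (unique-keyed) item lists; since keys are distinct, Python's lexicographic
-- tuple sort coincides with the stable sort by first component used here.
def are_settings_identical (old : Option (List (String × String))) (new : Option (List (String × String))) (white_list : Option (List String)) : Bool :=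
  match old, new with
  | none, none => true
  | none, some _ => false
  | some _, none => false
  | some o, some n =>
    let od := PySem.Dict.ofList o
    let nd := PySem.Dict.ofList n
    let old_items := PySem.List.sorted od.items (fun p => p.1) false
    let new_items := PySem.List.sorted nd.items (fun p => p.1) false
    match white_list with
    | none => old_items == new_items
    | some ws =>
      let old_override := ws.foldl (fun d k => if od.contains k then d.insert k (od.getD k "") else d) PySem.Dict.empty
      let new_override := ws.foldl (fun d k => if nd.contains k then d.insert k (nd.getD k "") else d) PySem.Dict.empty
      PySem.List.sorted old_override.items (fun p => p.1) false == PySem.List.sorted new_override.items (fun p => p.1) false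

-- ===== PORT B =====
-- Python's `old == new` on dicts ignores insertion order: ported as the two-way item/get? check.
def are_settings_identical_alt (old : Option (List (String × String))) (new : Option (List (String × String))) (white_list : Option (List String)) : Bool :=
  match old, new with
  | none, none => true
  | none, some _ => false
  | some _, none => false
  | some o, some n =>
    let od := PySem.Dict.ofList o
    let nd := PySem.Dict.ofList n
    match white_list with
    | none =>
      od.items.all (fun p => nd.get? p.1 == some p.2) && nd.items.all (fun p => od.get? p.1 == some p.2)
    | some ws =>
      ws.all (fun k =>
        let in_old := od.contains k
        if in_old != nd.contains k then false
        else if in_old && !(od.getD k "" == nd.getD k "") then false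
        else true)

-- ===== PRECONDITION & SPEC =====
def Spec_are_settings_identical (old : Option (List (String × String))) (new : Option (List (String × String))) (white_list : Option (List String)) (out : Bool) : Prop := out = are_settings_identical_alt old new white_list
instance (old : Option (List (String × String))) (new : Option (List (String × String))) (white_list : Option (List String)) (out : Bool) : Decidable (Spec_are_settings_identical old new white_list out) := by unfold Spec_are_settings_identical; infer_instance

-- ===== CLAIM (what is proved, stated in full; the proofs are below) =====
def Claim_equal_are_settings_identical : Prop := ∀ (old : Option (List (String × String))) (new : Option (List (String × String))) (white_list : Option (List String)), Dom_are_settings_identical old new white_list → Spec_are_settings_identical old new white_list (are_settings_identical old new white_list)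

-- ===== LEMMAS AND PROOFS =====

-- equal sorted-by-key lists of pairs ↔ same members, given distinct keys on both sides
lemma sorted_fst_eq_iff {l1 l2 : List (String × String)}
    (h1 : (l1.map Prod.fst).Nodup) (h2 : (l2.map Prod.fst).Nodup) :
    PySem.List.sorted l1 (fun p => p.1) false = PySem.List.sorted l2 (fun p => p.1) false ↔
      ∀ p, p ∈ l1 ↔ p ∈ l2 := by
  constructor
  · intro h p
    rw [← PySem.List.mem_sorted (key := fun p => p.1) (rev := false) (xs := l1),
        ← PySem.List.mem_sorted (key := fun p => p.1) (rev := false) (xs := l2), h]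
  · intro h
    have nd1 : l1.Nodup := h1.of_map
    have nd2 : l2.Nodup := h2.of_map
    have hperm : l1.Perm l2 := (List.perm_ext_iff_of_nodup nd1 nd2).mpr h
    have hsp : (PySem.List.sorted l1 (fun p => p.1) false).Perm l1 :=
      PySem.List.sorted_perm l1 (fun p => p.1) false
    have hle : (PySem.List.sorted l1 (fun p => p.1) false).Pairwise (fun a b => a.1 ≤ b.1) :=
      PySem.List.sorted_pairwise l1 (fun p => p.1)
    have hndk : ((PySem.List.sorted l1 (fun p => p.1) false).map Prod.fst).Nodup :=
      ((hsp.map Prod.fst).nodup_iff).mpr h1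
    have hne : (PySem.List.sorted l1 (fun p => p.1) false).Pairwise (fun a b => a.1 ≠ b.1) :=
      List.pairwise_map.mp hndk
    have hlt : (PySem.List.sorted l1 (fun p => p.1) false).Pairwise (fun a b => a.1 < b.1) := by
      have := hle.and hne
      exact this.imp (fun h => lt_of_le_of_ne h.1 h.2)
    exact (PySem.List.sorted_eq_of_perm_of_pairwise_lt l2 _ (fun p => p.1) (hsp.trans hperm) hlt).symm

-- same-members of items ↔ pointwise get?, given distinct keys
lemma items_ext_iff_get? (d1 d2 : PySem.Dict String String)
    (h1 : d1.keys.Nodup) (h2 : d2.keys.Nodup) :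
    (∀ p, p ∈ d1.items ↔ p ∈ d2.items) ↔ ∀ k, d1.get? k = d2.get? k := by
  constructor
  · intro h k
    cases hv : d1.get? k with
    | some v =>
      have : (k, v) ∈ d2.items := (h (k, v)).mp (PySem.Dict.mem_items_of_get?_eq_some d1 hv)
      exact (PySem.Dict.get?_of_mem_items d2 this h2).symm
    | none =>
      cases hw : d2.get? k with
      | some w =>
        have : (k, w) ∈ d1.items := (h (k, w)).mpr (PySem.Dict.mem_items_of_get?_eq_some d2 hw)
        exact absurd ((PySem.Dict.get?_of_mem_items d1 this h1).symm.trans hv) (by simp)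
      | none => rfl
  · intro h p
    obtain ⟨a, b⟩ := p
    rw [← PySem.Dict.get?_eq_some_iff_mem_items d1 a b h1, ← PySem.Dict.get?_eq_some_iff_mem_items d2 a b h2, h]

-- the override loop's dictionary, pointwise
lemma override_get? (od : PySem.Dict String String) (ws : List String)
    (d : PySem.Dict String String) (k : String) :
    (ws.foldl (fun d k => if od.contains k then d.insert k (od.getD k "") else d) d).get? k
      = if k ∈ ws ∧ od.contains k = true then some (od.getD k "") else d.get? k := by
  induction ws generalizing d with
  | nil => simp
  | cons w ws ih =>
    simp only [List.foldl_cons, ih, List.mem_cons]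
    by_cases hcw : od.contains w = true
    · simp only [hcw, if_true]
      by_cases hk : k = w
      · subst hk
        by_cases hm : k ∈ ws ∧ od.contains k = true
        · simp [hm]
        · simp [hcw, PySem.Dict.get?_insert_self]
      · rw [PySem.Dict.get?_insert_of_ne d _ hk]
        by_cases hm : k ∈ ws ∧ od.contains k = true
        · simp [hm]
        · have : ¬ ((k = w ∨ k ∈ ws) ∧ od.contains k = true) := by
            rintro ⟨hw | hw, hc⟩; · exact hk hw
            · exact hm ⟨hw, hc⟩
          simp [hm, this]
    · simp only [hcw]
      by_cases hm : k ∈ ws ∧ od.contains k = true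
      · simp [hm]
      · have : ¬ ((k = w ∨ k ∈ ws) ∧ od.contains k = true) := by
          rintro ⟨hw | hw, hc⟩
          · subst hw; exact hcw hc
          · exact hm ⟨hw, hc⟩
        simp [hm, this]

lemma override_nodup (od : PySem.Dict String String) (ws : List String)
    (d : PySem.Dict String String) (h : d.keys.Nodup) :
    (ws.foldl (fun d k => if od.contains k then d.insert k (od.getD k "") else d) d).keys.Nodup := by
  induction ws generalizing d with
  | nil => exact h
  | cons w ws ih =>
    simp only [List.foldl_cons]
    by_cases hcw : od.contains w = true
    · simp only [hcw, if_true]; exact ih _ (PySem.Dict.nodup_keys_insert d _ _ h)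
    · simp only [hcw]; exact ih _ h

-- ===== VERDICT (by name: the statement is the Claim_ definition above) =====
theorem are_settings_identical_spec : Claim_equal_are_settings_identical := by
  intro old new white_list _dom
  unfold Spec_are_settings_identical are_settings_identical are_settings_identical_alt
  match old, new with
  | none, none => rfl
  | none, some _ => rfl
  | some _, none => rfl
  | some o, some n =>
    simp only
    set od := PySem.Dict.ofList o with hod
    set nd := PySem.Dict.ofList n with hnd
    have hnod : od.keys.Nodup := PySem.Dict.nodup_keys_ofList o
    have hnnd : nd.keys.Nodup := PySem.Dict.nodup_keys_ofList n
    match white_list with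
    | none =>
      simp only
      rw [Bool.eq_iff_iff, beq_iff_eq, Bool.and_eq_true, List.all_eq_true, List.all_eq_true]
      rw [sorted_fst_eq_iff hnod hnnd, items_ext_iff_get? od nd hnod hnnd]
      constructor
      · intro h
        constructor
        · intro p hp
          have := (PySem.Dict.get?_eq_some_iff_mem_items od p.1 p.2 hnod).mpr (by simpa using hp)
          simp [← h p.1, this]
        · intro p hp
          have := (PySem.Dict.get?_eq_some_iff_mem_items nd p.1 p.2 hnnd).mpr (by simpa using hp)
          simp [h p.1, this]
      · intro ⟨h1, h2⟩ k
        cases hv : od.get? k with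
        | some v =>
          have hm : (k, v) ∈ od.items := PySem.Dict.mem_items_of_get?_eq_some od hv
          have := h1 (k, v) hm
          simp only [beq_iff_eq] at this
          exact this.symm
        | none =>
          cases hw : nd.get? k with
          | some w =>
            have hm : (k, w) ∈ nd.items := PySem.Dict.mem_items_of_get?_eq_some nd hw
            have := h2 (k, w) hm
            simp only [beq_iff_eq] at this
            exact absurd (this.symm.trans hv) (by simp)
          | none => rfl
    | some ws =>
      simp only
      set oo := ws.foldl (fun d k => if od.contains k then d.insert k (od.getD k "") else d) PySem.Dict.empty with hoo
      set no := ws.foldl (fun d k => if nd.contains k then d.insert k (nd.getD k "") else d) PySem.Dict.empty with hno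
      have hooN : oo.keys.Nodup := override_nodup od ws _ PySem.Dict.nodup_keys_empty
      have hnoN : no.keys.Nodup := override_nodup nd ws _ PySem.Dict.nodup_keys_empty
      rw [Bool.eq_iff_iff, beq_iff_eq, List.all_eq_true]
      rw [sorted_fst_eq_iff hooN hnoN, items_ext_iff_get? oo no hooN hnoN]
      have hog : ∀ k, oo.get? k = if k ∈ ws ∧ od.contains k = true then some (od.getD k "") else none := by
        intro k; rw [hoo, override_get?]; simp [PySem.Dict.get?_empty]
      have hng : ∀ k, no.get? k = if k ∈ ws ∧ nd.contains k = true then some (nd.getD k "") else none := by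
        intro k; rw [hno, override_get?]; simp [PySem.Dict.get?_empty]
      constructor
      · intro h k hk
        have hkk := h k
        rw [hog, hng] at hkk
        by_cases hco : od.contains k = true
        · by_cases hcn : nd.contains k = true
          · have hv : od.getD k "" = nd.getD k "" := by
              simpa [hk, hco, hcn] using hkk
            simp [hco, hcn, hv]
          · exact absurd hkk (by simp [hk, hco, hcn])
        · by_cases hcn : nd.contains k = true
          · exact absurd hkk (by simp [hk, hco, hcn])
          · simp [hco, hcn]
      · intro h k
        rw [hog, hng]
        by_cases hk : k ∈ ws
        · have hkk := h k hk
          by_cases hco : od.contains k = true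
          · by_cases hcn : nd.contains k = true
            · have hv : od.getD k "" = nd.getD k "" := by
                by_contra hne
                simp [hco, hcn, hne] at hkk
              simp [hk, hco, hcn, hv]
            · simp [hco, hcn] at hkk
          · by_cases hcn : nd.contains k = true
            · simp [hco, hcn] at hkk
            · simp [hk, hco, hcn]
        · simp [hk]
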